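-- pv_equiv track=rewrite | github.com/biomonika/washu-pedigree | genome-wide/TE/convert_vcf_query_to_ref.py | parse_info_min
-- ===== SOURCE A (Python) =====
-- def parse_info_min(info: str):
--     """
--     Extract QNAME, QSTART, QSTRAND from INFO without building a full dict.
--     Returns (qname, qstart:int, qstrand) or (None, None, None).
--     """
--     qname = qstart = qstrand = None
--     for item in info.split(";"):
--         if not item:
--             continue
--         if item.startswith("QNAME="):
--             qname = item[6:]
--         elif item.startswith("QSTART="):
--             try:
--                 qstart = int(item[7:])
--             except ValueError:
--                 qstart = None
--         elif item.startswith("QSTRAND="):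
--             qstrand = item[8:]
--     return qname, qstart, qstrand
-- ===== SOURCE B (Python) =====
-- def parse_info_min(info: str):
--     """Parse the whole INFO string into a dict (last occurrence of a key
--     wins), then answer the three fields by keyed lookup."""
--     d = {}
--     for item in info.split(";"):
--         key, sep, value = item.partition("=")
--         if sep:
--             d[key] = value
--     try:
--         qstart = int(d["QSTART"])
--     except (KeyError, ValueError):
--         qstart = None
--     return d.get("QNAME"), qstart, d.get("QSTRAND")
-- ===== Notes on version B (the rewrite author's own statement) =====
-- stated objective: alternative
-- what changed: Instead of tracking three candidate fields with a prefix-test branch chain, B parses every item into a dict via str.partition on the first '=' (last occurrence wins) and answers the three fields by keyed lookup, converting QSTART once at the end.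
import Mathlib
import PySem

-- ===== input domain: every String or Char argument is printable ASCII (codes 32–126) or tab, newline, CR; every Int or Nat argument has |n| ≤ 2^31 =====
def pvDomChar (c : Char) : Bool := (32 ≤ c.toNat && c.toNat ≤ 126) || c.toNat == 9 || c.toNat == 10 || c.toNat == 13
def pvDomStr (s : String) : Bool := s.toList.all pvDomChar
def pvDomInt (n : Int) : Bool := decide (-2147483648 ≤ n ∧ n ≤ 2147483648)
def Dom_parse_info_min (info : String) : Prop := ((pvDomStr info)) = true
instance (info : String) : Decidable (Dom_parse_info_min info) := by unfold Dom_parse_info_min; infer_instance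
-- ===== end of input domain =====

-- B replaces A's three-branch prefix tracking by a parse-everything dict pass (first-'=' split,
-- last key occurrence wins) plus three keyed lookups; same cost, alternative decomposition.

-- ===== PORT A =====
-- the loop body of A, named for the proofs; branches in A's order
def pvStepA (st : Option String × Option Int × Option String) (item : List Char) :
    Option String × Option Int × Option String :=
  if item = [] then st
  else if PySem.Chars.startswith item ("QNAME=".toList) then
    (some (String.ofList (PySem.Chars.slice item (some 6) none)), st.2.1, st.2.2)
  else if PySem.Chars.startswith item ("QSTART=".toList) then
    (st.1, PySem.Int.ofChars? (PySem.Chars.slice item (some 7) none), st.2.2)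
  else if PySem.Chars.startswith item ("QSTRAND=".toList) then
    (st.1, st.2.1, some (String.ofList (PySem.Chars.slice item (some 8) none)))
  else st

def parse_info_min (info : String) : Option String × Option Int × Option String :=
  (PySem.Chars.splitOn info.toList [';']).foldl pvStepA (none, none, none)

-- ===== PORT B =====
-- item.partition("="): some (before, after) on the FIRST '=', none when no '=' (exact for the
-- sep-found check B makes)
def pvPartEq (acc : List Char) : List Char → Option (List Char × List Char)
  | [] => none
  | c :: t => if c = '=' then some (acc.reverse, t) else pvPartEq (c :: acc) t

-- B's dict-building loop body
def pvStepB (d : PySem.Dict (List Char) (List Char)) (item : List Char) :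
    PySem.Dict (List Char) (List Char) :=
  match pvPartEq [] item with
  | some (k, v) => d.insert k v
  | none => d

def parse_info_min_alt (info : String) : Option String × Option Int × Option String :=
  let d := (PySem.Chars.splitOn info.toList [';']).foldl pvStepB PySem.Dict.empty
  (Option.map String.ofList (d.get? "QNAME".toList),
   (d.get? "QSTART".toList).bind PySem.Int.ofChars?,
   Option.map String.ofList (d.get? "QSTRAND".toList))

-- ===== PRECONDITION & SPEC =====
def Spec_parse_info_min (info : String) (out : Option String × Option Int × Option String) : Prop := out = parse_info_min_alt info
instance (info : String) (out : Option String × Option Int × Option String) : Decidable (Spec_parse_info_min info out) := by unfold Spec_parse_info_min; infer_instance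

-- ===== CLAIM (what is proved, stated in full; the proofs are below) =====
def Claim_equal_parse_info_min : Prop := ∀ (info : String), Dom_parse_info_min info → Spec_parse_info_min info (parse_info_min info)

-- ===== LEMMAS AND PROOFS =====

-- A's state as a function of B's dict
def pvView (d : PySem.Dict (List Char) (List Char)) :
    Option String × Option Int × Option String :=
  (Option.map String.ofList (d.get? "QNAME".toList),
   (d.get? "QSTART".toList).bind PySem.Int.ofChars?,
   Option.map String.ofList (d.get? "QSTRAND".toList))

theorem pvPartEq_none {item : List Char} (acc : List Char)
    (h : pvPartEq acc item = none) : '=' ∉ item := by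
  induction item generalizing acc with
  | nil => simp
  | cons c t ih =>
    simp only [pvPartEq] at h
    by_cases hc : c = '='
    · simp [hc] at h
    · rw [if_neg hc] at h
      intro hmem
      rcases List.mem_cons.mp hmem with h1 | h2
      · exact hc h1.symm
      · exact (ih _ h) h2

theorem pvPartEq_some {item k v : List Char} (acc : List Char)
    (h : pvPartEq acc item = some (k, v)) :
    ∃ k', k = acc.reverse ++ k' ∧ item = k' ++ '=' :: v ∧ '=' ∉ k' := by
  induction item generalizing acc with
  | nil => simp [pvPartEq] at h
  | cons c t ih =>
    simp only [pvPartEq] at h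
    by_cases hc : c = '='
    · simp only [if_pos hc, Option.some.injEq, Prod.mk.injEq] at h
      exact ⟨[], by simp [h.1], by simp [hc, h.2], by simp⟩
    · rw [if_neg hc] at h
      obtain ⟨k', hk, ht, hm⟩ := ih _ h
      refine ⟨c :: k', by simpa using hk, by simp [ht], ?_⟩
      intro hmem
      rcases List.mem_cons.mp hmem with h1 | h2
      · exact hc h1.symm
      · exact hm h2

theorem pvEqSplit_unique : ∀ (a k : List Char) (b v : List Char), '=' ∉ a → '=' ∉ k →
    a ++ '=' :: b = k ++ '=' :: v → a = k ∧ b = v := by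
  intro a
  induction a with
  | nil =>
    intro k b v _ hk h
    cases k with
    | nil => simpa using h
    | cons c t =>
      simp only [List.nil_append, List.cons_append, List.cons.injEq] at h
      exact absurd (h.1 ▸ List.mem_cons_self) hk
  | cons c t ih =>
    intro k b v ha hk h
    cases k with
    | nil =>
      simp only [List.cons_append, List.nil_append, List.cons.injEq] at h
      exact absurd (h.1 ▸ List.mem_cons_self) ha
    | cons c' t' =>
      simp only [List.cons_append, List.cons.injEq] at h
      obtain ⟨h1, h2⟩ := h
      have := ih t' b v (by simp at ha; exact ha.2) (by simp at hk; exact hk.2) h2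
      exact ⟨by simp [h1, this.1], this.2⟩

-- startswith of "K=" on k ++ '=' :: v, '=' ∉ k, decides k = K
theorem pvStarts_iff {k v K : List Char} (hk : '=' ∉ k) (hK : '=' ∉ K) :
    PySem.Chars.startswith (k ++ '=' :: v) (K ++ ['=']) = true ↔ k = K := by
  rw [PySem.Chars.startswith_iff]
  constructor
  · rintro ⟨r, hr⟩
    have : K ++ '=' :: r = k ++ '=' :: v := by simpa using hr
    exact (pvEqSplit_unique K k r v hK hk this).1.symm
  · rintro rfl
    exact ⟨v, by simp⟩

theorem pvStep_sim (d : PySem.Dict (List Char) (List Char)) (item : List Char) :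
    pvStepA (pvView d) item = pvView (pvStepB d item) := by
  cases h : pvPartEq [] item with
  | none =>
    have hno : '=' ∉ item := pvPartEq_none [] h
    have hsw : ∀ P : List Char, '=' ∈ P → PySem.Chars.startswith item P = false := by
      intro P hP
      by_contra hc
      have hT : PySem.Chars.startswith item P = true := by
        cases hb : PySem.Chars.startswith item P with
        | false => exact absurd hb hc
        | true => rfl
      exact hno (((PySem.Chars.startswith_iff item P).mp hT).subset hP)
    simp only [pvStepB, h, pvStepA]
    by_cases hi : item = []
    · simp [hi]
    · rw [if_neg hi,
        if_neg (by simp [hsw ['Q','N','A','M','E','='] (by decide)]),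
        if_neg (by simp [hsw ['Q','S','T','A','R','T','='] (by decide)]),
        if_neg (by simp [hsw ['Q','S','T','R','A','N','D','='] (by decide)])]
  | some kv =>
    obtain ⟨k, v⟩ := kv
    obtain ⟨k', hk0, hitem, hm⟩ := pvPartEq_some [] h
    simp only [List.reverse_nil, List.nil_append] at hk0
    subst hk0; subst hitem
    simp only [pvStepB, h]
    by_cases h1 : k = "QNAME".toList
    · subst h1
      have hs : PySem.List.slice ('Q'::'N'::'A'::'M'::'E'::'='::v) (some 6) none = v := by
        rw [PySem.List.slice_from _ (by norm_num : (0:Int) ≤ 6)]; simp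
      simp [pvStepA, pvView, PySem.Chars.startswith, List.isPrefixOf, hs,
        PySem.Dict.get?_insert]
    · by_cases h2 : k = "QSTART".toList
      · subst h2
        have hs : PySem.List.slice ('Q'::'S'::'T'::'A'::'R'::'T'::'='::v) (some 7) none = v := by
          rw [PySem.List.slice_from _ (by norm_num : (0:Int) ≤ 7)]; simp
        simp [pvStepA, pvView, PySem.Chars.startswith, List.isPrefixOf, hs,
          PySem.Dict.get?_insert]
      · by_cases h3 : k = "QSTRAND".toList
        · subst h3
          have hs : PySem.List.slice ('Q'::'S'::'T'::'R'::'A'::'N'::'D'::'='::v) (some 8) none = v := by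
            rw [PySem.List.slice_from _ (by norm_num : (0:Int) ≤ 8)]; simp
          simp [pvStepA, pvView, PySem.Chars.startswith, List.isPrefixOf, hs,
            PySem.Dict.get?_insert]
        · have hQN := pvStarts_iff (v := v) (K := "QNAME".toList) hm (by decide)
          have hQS := pvStarts_iff (v := v) (K := "QSTART".toList) hm (by decide)
          have hQT := pvStarts_iff (v := v) (K := "QSTRAND".toList) hm (by decide)
          have h1' : ¬("QNAME".toList = k) := fun hh => h1 hh.symm
          have h2' : ¬("QSTART".toList = k) := fun hh => h2 hh.symm
          have h3' : ¬("QSTRAND".toList = k) := fun hh => h3 hh.symm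
          simp only [pvStepA, pvView, PySem.Dict.get?_insert]
          rw [if_neg (by simp), if_neg (by simpa using hQN.not.mpr h1),
            if_neg (by simpa using hQS.not.mpr h2),
            if_neg (by simpa using hQT.not.mpr h3),
            if_neg (by simpa using h1'), if_neg (by simpa using h2'),
            if_neg (by simpa using h3')]

theorem pvLoop (items : List (List Char)) (d : PySem.Dict (List Char) (List Char)) :
    items.foldl pvStepA (pvView d) = pvView (items.foldl pvStepB d) := by
  induction items generalizing d with
  | nil => rfl
  | cons it t ih => simp only [List.foldl_cons, pvStep_sim d it, ih]

-- ===== VERDICT (by name: the statement is the Claim_ definition above) =====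
theorem parse_info_min_spec : Claim_equal_parse_info_min := by
  intro info _
  unfold Spec_parse_info_min parse_info_min parse_info_min_alt
  have h0 : (none, none, none) = pvView PySem.Dict.empty := by
    simp [pvView, PySem.Dict.get?_empty]
  rw [h0, pvLoop]
  rfl
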